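-- pv_equiv track=rewrite | github.com/neurodata/brainlit | brainlit/cloudreg/scripts/parastitcher.py | find_last_slash
-- ===== SOURCE A (Python) =====
-- def find_last_slash(string):
--     """
--         Search for / in a string. If one or more / was found, divide the string in a list of two string:
--         the first containf all the character at left of the last / (included),
--         and the second contains the remanent part of the text.
--         If no / was found, the first element of the list will be set to ''
--         """
--     len_string = len(string)
--     check = 0
--     index = []
--     i = 0
--     for chara in string:
--         if chara == "/" or chara == "\\":
--             index.append(i)
--             check = 1
--         i += 1
--
--     if check == 1:
--         last_slash = max(index)
--         output_string = [string[0 : last_slash + 1], string[last_slash + 1 :]]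
--     else:
--         output_string = ["", string]
--     return output_string
-- ===== SOURCE B (Python) =====
-- def find_last_slash(string):
--     i = len(string)
--     for ch in reversed(string):
--         i -= 1
--         if ch == "/" or ch == "\\":
--             return [string[: i + 1], string[i + 1 :]]
--     return ["", string]
-- ===== Notes on version B (the rewrite author's own statement) =====
-- stated objective: simpler
-- what changed: A scans forward collecting every separator index into a list plus a found-flag and then takes the list's max; B scans backward and returns at the first separator seen from the right, keeping no list and no flag.
import Mathlib
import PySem

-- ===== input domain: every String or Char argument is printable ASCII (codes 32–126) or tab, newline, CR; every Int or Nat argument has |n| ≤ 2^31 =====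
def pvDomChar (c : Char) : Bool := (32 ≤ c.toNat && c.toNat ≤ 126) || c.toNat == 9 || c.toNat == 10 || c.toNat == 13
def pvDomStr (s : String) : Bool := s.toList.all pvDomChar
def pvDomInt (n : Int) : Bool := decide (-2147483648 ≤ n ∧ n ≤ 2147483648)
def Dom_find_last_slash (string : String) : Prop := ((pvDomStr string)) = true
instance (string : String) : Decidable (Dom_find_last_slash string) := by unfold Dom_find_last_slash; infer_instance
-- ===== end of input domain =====

-- B replaces A's forward scan that collects every separator index (then takes its max)
-- by a single backward scan that stops at the first separator from the right (simpler, one pass, no index list).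

-- ===== PORT A =====
-- A-side helper: the body of A's for-loop (state = (check, index, i))
def flsStep (acc : Int × List Int × Int) (chara : Char) : Int × List Int × Int :=
  if chara = '/' ∨ chara = '\\' then (1, acc.2.1 ++ [acc.2.2], acc.2.2 + 1)
  else (acc.1, acc.2.1, acc.2.2 + 1)

def find_last_slash (string : String) : List String :=
  let cs := string.toList
  let st := cs.foldl flsStep (0, [], 0)
  if st.1 = 1 then
    match PySem.List.max? st.2.1 (fun x => x) with   -- max(index); index is nonempty when check = 1
    | some last_slash =>
        [String.ofList (PySem.List.slice cs (some 0) (some (last_slash + 1))),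
         String.ofList (PySem.List.slice cs (some (last_slash + 1)) none)]
    | none => ["", string]                           -- unreachable: check = 1 forces index ≠ []
  else ["", string]

-- ===== PORT B =====
-- B-side helper: the backward scan (rev = still-unscanned prefix, reversed; i = its length)
def flsGo (cs : List Char) : List Char → Nat → List String
  | [], _ => ["", String.ofList cs]
  | ch :: rest, i =>
    let i' := i - 1
    if ch = '/' ∨ ch = '\\' then
      [String.ofList (cs.take (i' + 1)), String.ofList (cs.drop (i' + 1))]
    else flsGo cs rest i'

def find_last_slash_alt (string : String) : List String :=
  let cs := string.toList
  flsGo cs cs.reverse cs.length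

-- ===== PRECONDITION & SPEC =====
def Spec_find_last_slash (string : String) (out : List String) : Prop := out = find_last_slash_alt string
instance (string : String) (out : List String) : Decidable (Spec_find_last_slash string out) := by unfold Spec_find_last_slash; infer_instance

-- ===== CLAIM (what is proved, stated in full; the proofs are below) =====
def Claim_equal_find_last_slash : Prop := ∀ (string : String), Dom_find_last_slash string → Spec_find_last_slash string (find_last_slash string)

-- ===== LEMMAS AND PROOFS =====

-- the separator test, as the Bool the ports' `if` decides
def isSep (c : Char) : Bool := decide (c = '/' ∨ c = '\\')

-- index of the last separator of cs, if any
def lastSep? (cs : List Char) : Option Nat :=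
  (cs.reverse.findIdx? isSep).map (fun k => cs.length - 1 - k)

-- the common splitting behaviour both ports are proved equal to
def splitAtLast (s : String) : List String :=
  match lastSep? s.toList with
  | none => ["", s]
  | some j => [String.ofList (s.toList.take (j + 1)), String.ofList (s.toList.drop (j + 1))]

-- the separator positions of cs, offset by i0 (what A's `index` list accumulates)
def sepPos : List Char → Int → List Int
  | [], _ => []
  | c :: t, i => if c = '/' ∨ c = '\\' then i :: sepPos t (i + 1) else sepPos t (i + 1)

theorem foldl_flsStep (cs : List Char) : ∀ (c0 : Int) (idx0 : List Int) (i0 : Int),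
    cs.foldl flsStep (c0, idx0, i0) =
      ((if sepPos cs i0 = [] then c0 else 1), idx0 ++ sepPos cs i0, i0 + cs.length) := by
  induction cs with
  | nil => intro c0 idx0 i0; simp [sepPos]
  | cons c t ih =>
    intro c0 idx0 i0
    by_cases h : c = '/' ∨ c = '\\' <;>
      simp [flsStep, sepPos, h, ih, List.append_assoc] <;> ring

theorem sepPos_lt (cs : List Char) : ∀ (i0 : Int) (x : Int), x ∈ sepPos cs i0 → x < i0 + cs.length := by
  induction cs with
  | nil => intro i0 x hx; simp [sepPos] at hx
  | cons c t ih =>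
    intro i0 x hx
    by_cases h : c = '/' ∨ c = '\\'
    · simp only [sepPos, if_pos h, List.mem_cons] at hx
      rcases hx with rfl | hx
      · simp only [List.length_cons]
        push_cast
        omega
      · have := ih (i0 + 1) x hx
        simp only [List.length_cons] at *
        omega
    · simp only [sepPos, if_neg h] at hx
      have := ih (i0 + 1) x hx
      simp only [List.length_cons] at *
      omega

theorem sepPos_append (l : List Char) (c : Char) : ∀ (i0 : Int),
    sepPos (l ++ [c]) i0 = sepPos l i0 ++ (if c = '/' ∨ c = '\\' then [i0 + l.length] else []) := by
  induction l with
  | nil => intro i0; by_cases h : c = '/' ∨ c = '\\' <;> simp [sepPos, h]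
  | cons a t ih =>
    intro i0
    by_cases h : a = '/' ∨ a = '\\' <;>
      simp [sepPos, h, ih] <;> ring_nf

theorem max?_append_last (xs : List Int) (x : Int) (h : ∀ y ∈ xs, y ≤ x) :
    PySem.List.max? (xs ++ [x]) (fun y => y) = some x := by
  cases xs with
  | nil => simp [PySem.List.max?_id_cons]
  | cons a t =>
    have hcons : (a :: t) ++ [x] = a :: (t ++ [x]) := rfl
    rw [hcons, PySem.List.max?_id_cons, List.foldl_append]
    have hmem := PySem.List.foldl_max_mem t a
    have hle : t.foldl max a ≤ x := by
      rcases hmem with he | hm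
      · rw [he]; exact h a (by simp)
      · exact h _ (by simp [hm])
    simp [max_eq_right hle]

theorem lastSep?_append (l : List Char) (c : Char) :
    lastSep? (l ++ [c]) = if c = '/' ∨ c = '\\' then some l.length else lastSep? l := by
  by_cases h : c = '/' ∨ c = '\\'
  · simp [lastSep?, isSep, List.findIdx?_cons, h]
  · have hc : isSep c = false := by simp [isSep, h]
    simp only [lastSep?, List.reverse_append, List.reverse_singleton, List.singleton_append,
      List.findIdx?_cons, hc, Bool.false_eq_true, if_false, Option.map_map, if_neg h]
    congr 1
    funext k
    simp only [Function.comp_apply, List.length_append, List.length_singleton]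
    omega

theorem sepPos_nil_iff (cs : List Char) (i0 : Int) : sepPos cs i0 = [] ↔ lastSep? cs = none := by
  induction cs using List.reverseRecOn generalizing i0 with
  | nil => simp [sepPos, lastSep?]
  | append_singleton l c ih =>
    rw [sepPos_append, lastSep?_append]
    by_cases h : c = '/' ∨ c = '\\' <;> simp [h, ih]

theorem max?_sepPos (cs : List Char) (j : Nat) (hj : lastSep? cs = some j) :
    PySem.List.max? (sepPos cs 0) (fun x => x) = some (j : Int) := by
  induction cs using List.reverseRecOn generalizing j with
  | nil => simp [lastSep?] at hj
  | append_singleton l c ih =>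
    rw [lastSep?_append] at hj
    rw [sepPos_append]
    by_cases h : c = '/' ∨ c = '\\'
    · rw [if_pos h] at hj ⊢
      obtain rfl : l.length = j := by simpa using hj
      rw [zero_add]
      apply max?_append_last
      intro y hy
      have := sepPos_lt l 0 y hy
      omega
    · rw [if_neg h] at hj ⊢
      simpa using ih j hj

theorem A_eq_splitAtLast (s : String) : find_last_slash s = splitAtLast s := by
  simp only [find_last_slash, splitAtLast, foldl_flsStep, List.nil_append]
  cases hls : lastSep? s.toList with
  | none =>
    have h0 : sepPos s.toList 0 = [] := (sepPos_nil_iff _ _).mpr hls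
    simp [h0]
  | some j =>
    have h0 : sepPos s.toList 0 ≠ [] := by
      intro h
      rw [(sepPos_nil_iff _ _).mp h] at hls
      simp at hls
    have hmax := max?_sepPos s.toList j hls
    simp only [h0, if_false, hmax]
    have hcast : ((j : Int) + 1) = ((j + 1 : Nat) : Int) := by push_cast; ring
    rw [hcast]
    simp only [if_true, PySem.List.slice_zero_start]
    rw [PySem.List.slice_to_natCast, PySem.List.slice_from_natCast]

theorem flsGo_eq (cs : List Char) : ∀ (rev : List Char) (i : Nat), i ≤ cs.length →
    rev = (cs.take i).reverse →
    flsGo cs rev i =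
      match rev.findIdx? isSep with
      | none => ["", String.ofList cs]
      | some k => [String.ofList (cs.take (i - k)), String.ofList (cs.drop (i - k))] := by
  intro rev
  induction rev with
  | nil => intro i _ _; simp [flsGo]
  | cons ch rest ih =>
    intro i hi hrev
    have htake : cs.take i = rest.reverse ++ [ch] := by
      simpa using (congrArg List.reverse hrev).symm
    have hilen : i = rest.length + 1 := by
      have h1 : (cs.take i).length = i := by
        simp only [List.length_take]
        omega
      rw [htake] at h1
      simp at h1
      omega
    have hrest : rest = (cs.take (i - 1)).reverse := by
      have h2 : cs.take (i - 1) = (cs.take i).take (i - 1) := by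
        rw [List.take_take]
        congr 1
        omega
      rw [h2, htake, hilen]
      simp
    by_cases h : ch = '/' ∨ ch = '\\'
    · have hc : isSep ch = true := by simp [isSep, h]
      simp only [flsGo, if_pos h, List.findIdx?_cons, hc, if_pos]
      simp [show i - 1 + 1 = i from by omega]
    · have hc : isSep ch = false := by simp [isSep, h]
      have hrec := ih (i - 1) (by omega) hrest
      simp only [flsGo, if_neg h]
      rw [hrec, List.findIdx?_cons, hc]
      simp only [Bool.false_eq_true, if_false]
      cases hfi : rest.findIdx? isSep with
      | none => simp
      | some k =>
        simp only [Option.map_some]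
        simp [show i - 1 - k = i - (k + 1) from by omega]

theorem B_eq_splitAtLast (s : String) : find_last_slash_alt s = splitAtLast s := by
  simp only [find_last_slash_alt, splitAtLast]
  rw [flsGo_eq s.toList s.toList.reverse s.toList.length (le_refl _) (by simp)]
  unfold lastSep?
  cases hfi : s.toList.reverse.findIdx? isSep with
  | none => simp
  | some k =>
    have hk : k < s.toList.length := by
      have := (List.findIdx?_eq_some_iff_getElem.mp hfi).1
      simpa using this
    have hk' : k < s.length := by simpa using hk
    simp only [Option.map_some]
    simp [show s.length - 1 - k + 1 = s.length - k from by omega]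

-- ===== VERDICT (by name: the statement is the Claim_ definition above) =====
theorem find_last_slash_spec : Claim_equal_find_last_slash := by
  intro s _
  unfold Spec_find_last_slash
  rw [A_eq_splitAtLast, B_eq_splitAtLast]
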